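-- pv_equiv track=rewrite | github.com/sergiogg-ops/FAKEnHATE | translation/translation_utils.py | wrapp_texts
-- ===== SOURCE A (Python) =====
-- def wrapp_texts(sents, mask):
--     '''
--     Wrapp the sentences into the original samples.
--
--     Args:
--         sents: List with the sentences.
--         mask: List with the mask.
--
--     Returns:
--         data: List with the samples.
--     '''
--     data = []
--     for sent, start in zip(sents, mask):
--         if start == -1:
--             data.append('')
--         elif start:
--             data.append(sent)
--         else:
--             data[-1] += ' ' + sent
--     return data
-- ===== SOURCE B (Python) =====
-- def wrapp_texts(sents, mask):
--     '''
--     Wrapp the sentences into the original samples.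
--
--     Run-based: scans the zipped list in runs — each run is one sample-start
--     marker followed by its stretch of 0 markers — and builds each sample
--     with a single ' '.join per run instead of element-by-element appends.
--     '''
--     pairs = list(zip(sents, mask))
--     n = len(pairs)
--     data = []
--     i = 0
--     while i < n:
--         sent, start = pairs[i]
--         head = '' if start == -1 else sent
--         j = i + 1
--         while j < n and pairs[j][1] == 0:
--             j += 1
--         data.append(' '.join([head] + [s for s, _ in pairs[i + 1:j]]))
--         i = j
--     return data
-- ===== Notes on version B (the rewrite author's own statement) =====
-- stated objective: alternative
-- what changed: B scans the zipped input run by run (a start marker plus its following run of 0 markers) and emits each sample with one ' '.join per run, instead of A's single element-wise loop that mutates data[-1] by repeated string concatenation.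
import Mathlib
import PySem

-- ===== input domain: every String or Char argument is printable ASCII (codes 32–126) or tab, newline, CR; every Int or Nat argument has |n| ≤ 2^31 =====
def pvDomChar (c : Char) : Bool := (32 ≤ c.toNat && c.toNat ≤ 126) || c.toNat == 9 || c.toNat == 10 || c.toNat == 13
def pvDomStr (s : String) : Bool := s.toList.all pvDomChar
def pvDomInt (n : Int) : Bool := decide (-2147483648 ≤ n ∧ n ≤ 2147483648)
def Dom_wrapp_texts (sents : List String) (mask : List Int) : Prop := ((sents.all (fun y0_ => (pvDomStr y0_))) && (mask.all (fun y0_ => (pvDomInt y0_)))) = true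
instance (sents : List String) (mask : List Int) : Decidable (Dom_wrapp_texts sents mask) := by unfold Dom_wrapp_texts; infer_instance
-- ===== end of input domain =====

-- B rebuilds the samples run by run (one start marker plus its following run of 0 markers,
-- one ' '.join per run) instead of A's element-wise loop mutating data[-1]; return values agree on Pre_.

-- ===== PORT A =====
-- data[-1] += ' ' + sent is modelled with PySem.List.pyGet? data (-1); `none` (Python IndexError) aborts the loop.
def wrappA_loop (data : List String) (pairs : List (String × Int)) : Option (List String) :=
  match pairs with
  | [] => some data
  | (sent, start) :: rest =>
    if start = -1 then wrappA_loop (data ++ [""]) rest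
    else if start ≠ 0 then wrappA_loop (data ++ [sent]) rest
    else match PySem.List.pyGet? data (-1) with
      | none => none
      | some last => wrappA_loop (data.dropLast ++ [last ++ " " ++ sent]) rest

def wrapp_texts (sents : List String) (mask : List Int) : List String :=
  (wrappA_loop [] (sents.zip mask)).getD []

-- ===== PORT B =====
-- outer while over i: one step per run; the inner while collecting the run of 0 markers is the
-- takeWhile / dropWhile split of the remaining pairs (exact: it scans the same elements in order).
def wrappB_go (pairs : List (String × Int)) : List String :=
  match pairs with
  | [] => []
  | (sent, start) :: rest =>
    let head := if start = -1 then "" else sent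
    let run := rest.takeWhile (fun p => p.2 == 0)
    PySem.Str.join " " (head :: run.map Prod.fst) :: wrappB_go (rest.dropWhile (fun p => p.2 == 0))
termination_by pairs.length
decreasing_by
  simp only [List.length_cons]
  exact Nat.lt_succ_of_le (List.length_dropWhile_le _ _)

def wrapp_texts_alt (sents : List String) (mask : List Int) : List String :=
  wrappB_go (sents.zip mask)

-- ===== PRECONDITION & SPEC =====
-- Pre_ excludes exactly the inputs where Python A raises IndexError:
-- a non-empty sents whose first mask entry is 0, so data[-1] is read before any append.
def Pre_wrapp_texts (sents : List String) (mask : List Int) : Prop :=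
  sents = [] ∨ mask.head? ≠ some 0
instance (sents : List String) (mask : List Int) : Decidable (Pre_wrapp_texts sents mask) := by
  unfold Pre_wrapp_texts; infer_instance

def pvWitness_wrapp_texts : List String × List Int := (["a", "b", "c"], [1, 0, -1])

def Spec_wrapp_texts (sents : List String) (mask : List Int) (out : List String) : Prop := out = wrapp_texts_alt sents mask
instance (sents : List String) (mask : List Int) (out : List String) : Decidable (Spec_wrapp_texts sents mask out) := by unfold Spec_wrapp_texts; infer_instance

-- ===== CLAIM (what is proved, stated in full; the proofs are below) =====
def Claim_equal_wrapp_texts : Prop := ∀ (sents : List String) (mask : List Int), Dom_wrapp_texts sents mask → Pre_wrapp_texts sents mask → Spec_wrapp_texts sents mask (wrapp_texts sents mask)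

-- ===== LEMMAS AND PROOFS =====

theorem pyGet_neg_one {α : Type} (xs : List α) : PySem.List.pyGet? xs (-1) = xs.getLast? := by
  cases xs with
  | nil => rfl
  | cons a t =>
    simp only [PySem.List.pyGet?, PySem.List.pyIdx?]
    rw [if_neg (by omega), if_pos (by simp only [List.length_cons]; omega)]
    have h : (a :: t).length - (-(-1 : Int)).toNat = t.length := by simp
    rw [h]
    simp [List.getLast?_eq_getElem?]

theorem toList_injective' {a b : String} (h : a.toList = b.toList) : a = b := by
  have ha : String.ofList a.toList = a := String.ofList_toList
  have hb : String.ofList b.toList = b := String.ofList_toList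
  rw [← ha, ← hb, h]

theorem chars_join_append_singleton (sep x : List Char) :
    ∀ (l : List (List Char)), l ≠ [] →
    PySem.Chars.join sep (l ++ [x]) = PySem.Chars.join sep l ++ sep ++ x := by
  intro l
  induction l with
  | nil => simp
  | cons a t ih =>
    intro _
    cases t with
    | nil =>
      rw [List.cons_append, List.nil_append, PySem.Chars.join_cons_cons,
        PySem.Chars.join_singleton, PySem.Chars.join_singleton]
    | cons b u =>
      have hih := ih (by simp)
      simp only [List.cons_append] at hih ⊢
      rw [PySem.Chars.join_cons_cons, hih, PySem.Chars.join_cons_cons]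
      simp [List.append_assoc]

theorem sjoin_singleton (x : String) : PySem.Str.join " " [x] = x := by
  apply toList_injective'
  rw [PySem.Str.toList_join]
  simp [PySem.Chars.join_singleton]

theorem sjoin_append (g : List String) (x : String) (h : g ≠ []) :
    PySem.Str.join " " (g ++ [x]) = PySem.Str.join " " g ++ " " ++ x := by
  apply toList_injective'
  simp only [PySem.Str.toList_join, List.map_append, List.map_cons, List.map_nil,
    String.toList_append]
  rw [chars_join_append_singleton _ _ _ (by simp [h])]

-- join " " (x :: l)  ==  the left fold A performs with ' ' separators
theorem sjoin_eq_foldl (l : List String) (x : String) :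
    PySem.Str.join " " (x :: l) = l.foldl (fun a s => a ++ " " ++ s) x := by
  induction l using List.reverseRecOn generalizing x with
  | nil => exact sjoin_singleton x
  | append_singleton t s ih =>
    have : (x :: (t ++ [s])) = (x :: t) ++ [s] := by simp
    rw [this, sjoin_append _ _ (by simp), ih, List.foldl_append]
    rfl

-- A's loop over a run of 0-markers folds the sentences into the last slot
theorem wrappA_run (zeros : List (String × Int)) :
    ∀ (rest : List (String × Int)) (data : List String) (x : String),
    (∀ p ∈ zeros, p.2 = 0) →
    wrappA_loop (data ++ [x]) (zeros ++ rest)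
      = wrappA_loop (data ++ [zeros.foldl (fun a p => a ++ " " ++ p.1) x]) rest := by
  induction zeros with
  | nil => intro rest data x _; rfl
  | cons z t ih =>
    intro rest data x hz
    obtain ⟨s, m⟩ := z
    have hm : m = 0 := hz (s, m) List.mem_cons_self
    subst hm
    simp only [List.cons_append, wrappA_loop, if_neg (by decide : ¬((0:Int) = -1)),
      if_neg (by simp : ¬((0:Int) ≠ 0)), pyGet_neg_one, List.getLast?_concat,
      List.dropLast_concat]
    rw [ih rest data (x ++ " " ++ s) (fun p hp => hz p (List.mem_cons_of_mem _ hp))]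
    rfl

theorem head?_dropWhile_false {α : Type} (p : α → Bool) (l : List α) (a : α)
    (h : (l.dropWhile p).head? = some a) : p a = false := by
  induction l with
  | nil => simp at h
  | cons b t ih =>
    by_cases hb : p b
    · rw [List.dropWhile_cons_of_pos hb] at h; exact ih h
    · rw [List.dropWhile_cons_of_neg hb] at h
      simp at h; subst h; simpa using hb

theorem takeWhile_all {α : Type} (p : α → Bool) (l : List α) :
    ∀ q ∈ l.takeWhile p, p q = true := fun _ hq => List.mem_takeWhile_imp hq

theorem A_eq_B (n : Nat) : ∀ (pairs : List (String × Int)), pairs.length ≤ n →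
    ∀ (data : List String),
    (∀ a ∈ pairs.head?, a.2 ≠ 0) →
    wrappA_loop data pairs = some (data ++ wrappB_go pairs) := by
  induction n with
  | zero =>
    intro pairs hlen data _
    have : pairs = [] := List.eq_nil_of_length_eq_zero (Nat.le_zero.1 hlen)
    subst this; simp [wrappA_loop, wrappB_go]
  | succ k ih =>
    intro pairs hlen data hhd
    match pairs with
    | [] => simp [wrappA_loop, wrappB_go]
    | (sent, start) :: rest =>
      have hs : start ≠ 0 := hhd (sent, start) (by simp)
      have hsplit : rest = rest.takeWhile (fun p => p.2 == 0)
          ++ rest.dropWhile (fun p => p.2 == 0) := (List.takeWhile_append_dropWhile).symm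
      set run := rest.takeWhile (fun p => p.2 == 0) with hrun
      set rest' := rest.dropWhile (fun p => p.2 == 0) with hrest'
      have hrunz : ∀ p ∈ run, p.2 = 0 := by
        intro p hp
        have := takeWhile_all (fun p => p.2 == 0) rest p hp
        simpa using this
      have hrest'hd : ∀ a ∈ rest'.head?, a.2 ≠ 0 := by
        intro a ha
        have := head?_dropWhile_false (fun p => p.2 == 0) rest a (by simpa using ha)
        simpa using this
      have hlen' : rest'.length ≤ k := by
        have h1 : rest'.length ≤ rest.length := List.length_dropWhile_le _ _
        simp only [List.length_cons] at hlen
        omega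
      have hstep : ∀ (h : String),
          wrappA_loop (data ++ [h]) rest
            = some (data ++ (PySem.Str.join " " (h :: run.map Prod.fst) :: wrappB_go rest')) := by
        intro h
        conv_lhs => rw [hsplit]
        rw [wrappA_run run rest' data h hrunz, ih rest' hlen' _ hrest'hd]
        congr 1
        rw [sjoin_eq_foldl, List.foldl_map]
        simp
      by_cases h1 : start = -1
      · rw [show wrappA_loop data ((sent, start) :: rest) = wrappA_loop (data ++ [""]) rest by
          simp [wrappA_loop, h1]]
        rw [hstep ""]
        simp [wrappB_go, h1, ← hrun, ← hrest']
      · rw [show wrappA_loop data ((sent, start) :: rest) = wrappA_loop (data ++ [sent]) rest by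
          simp [wrappA_loop, h1, hs]]
        rw [hstep sent]
        simp [wrappB_go, h1, ← hrun, ← hrest']

-- ===== VERDICT (by name: the statement is the Claim_ definition above) =====
theorem wrapp_texts_spec : Claim_equal_wrapp_texts := by
  intro sents mask _hdom hpre
  unfold Spec_wrapp_texts wrapp_texts wrapp_texts_alt
  have hhd : ∀ a ∈ (sents.zip mask).head?, a.2 ≠ 0 := by
    intro a ha
    cases sents with
    | nil => simp at ha
    | cons s st =>
      cases mask with
      | nil => simp at ha
      | cons m mt =>
        simp only [List.zip_cons_cons, List.head?_cons, Option.mem_def, Option.some.injEq] at ha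
        subst ha
        rcases hpre with h | h
        · simp at h
        · simpa using h
  rw [A_eq_B (sents.zip mask).length _ le_rfl [] hhd]
  rfl
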